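-- pv_equiv track=rewrite | github.com/kren1504/Training | loneliest.py | loneliest
-- ===== SOURCE A (Python) =====
-- def loneliest(strng):
--     cizq= 0
--     cder = 0
--     res = []
--     maximo=0
--     aux = 0
--     strng = strng.strip()
--
--     for i in range(len(strng)):
--         letraActual = strng[i]
--         if strng[i].isalpha():
--             aux = i-1
--             while (aux > -1 ):
--                 if strng[aux] == " ":
--                     cizq +=1
--                     aux-=1
--                 else:
--                     break
--             i = i+1
--             while ( i< len(strng)):
--                 if strng[i] == " ":
--                     cder +=1
--                     i +=1
--                 else:
--                     break
--             if cder + cizq > maximo: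
--                 maximo = cder + cizq
--                 res = []
--                 res.append(letraActual)
--                 cizq = 0
--                 cder = 0
--                 continue
--
--
--             if cder + cizq == maximo:
--                 res.append(letraActual)
--             cizq = 0
--             cder = 0
--
--     return res
-- ===== SOURCE B (Python) =====
-- def loneliest(strng):
--     s = strng.strip()
--     # left[i] / right[i]: number of consecutive spaces immediately left / right of position i,
--     # each computed in one linear pass instead of A's per-letter inner scans.
--     left = []
--     run = 0
--     for ch in s:
--         left.append(run)
--         run = run + 1 if ch == ' ' else 0
--     right = []
--     run = 0
--     for ch in reversed(s):
--         right.append(run)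
--         run = run + 1 if ch == ' ' else 0
--     right.reverse()
--     best = 0
--     res = []
--     for ch, l, r in zip(s, left, right):
--         if ch.isalpha():
--             score = l + r
--             if score > best:
--                 best, res = score, [ch]
--             elif score == best:
--                 res.append(ch)
--     return res
-- ===== Notes on version B (the rewrite author's own statement) =====
-- stated objective: alternative
-- what changed: B precomputes per-position left/right consecutive-space run lengths in two linear passes and selects the max-score letters in one final pass, instead of A's per-letter inner while-scans over the surrounding spaces.
import Mathlib
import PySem

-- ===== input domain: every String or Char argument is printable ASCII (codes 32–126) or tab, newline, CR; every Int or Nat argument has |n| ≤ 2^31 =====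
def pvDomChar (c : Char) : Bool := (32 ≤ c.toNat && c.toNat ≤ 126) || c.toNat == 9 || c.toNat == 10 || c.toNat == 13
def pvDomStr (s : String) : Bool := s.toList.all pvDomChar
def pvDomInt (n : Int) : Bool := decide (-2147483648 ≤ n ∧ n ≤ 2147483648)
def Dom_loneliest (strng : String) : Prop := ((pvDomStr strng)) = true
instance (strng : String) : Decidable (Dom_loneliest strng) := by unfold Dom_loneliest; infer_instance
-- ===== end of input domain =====

-- B replaces A's per-letter inner while-scans over the neighbouring spaces by two linear
-- precomputation passes of left/right consecutive-space run lengths (objective: alternative,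
-- O(n) worst case vs A's O(n^2); a timing run did not consistently confirm a speed-up).

-- ===== PORT A =====
-- the backward `while aux > -1` loop; fuel only makes the recursion structural (always sufficient:
-- the loop runs at most s.length times); the index aux is in range whenever read, so getD is exact
def pvA_left (s : List Char) : Nat → Int → Nat → Nat
  | 0, _, cizq => cizq
  | fuel + 1, aux, cizq =>
    if aux > -1 then
      if s.getD aux.toNat ' ' == ' ' then pvA_left s fuel (aux - 1) (cizq + 1) else cizq
    else cizq

-- the forward `while i < len(strng)` loop (same fuel remark)
def pvA_right (s : List Char) : Nat → Nat → Nat → Nat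
  | 0, _, cder => cder
  | fuel + 1, i, cder =>
    if i < s.length then
      if s.getD i ' ' == ' ' then pvA_right s fuel (i + 1) (cder + 1) else cder
    else cder

-- one iteration of A's for-loop; state = (res, maximo); cizq/cder are 0 at the start of every
-- iteration and reset before the next, so they are local here
def pvA_step (s : List Char) (st : List String × Nat) (i : Nat) : List String × Nat :=
  let letraActual := s.getD i ' '
  if PySem.Chars.isalpha letraActual then
    let cizq := pvA_left s s.length ((i : Int) - 1) 0
    let cder := pvA_right s (s.length + 1) (i + 1) 0
    if cder + cizq > st.2 then ([String.ofList [letraActual]], cder + cizq)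
    else if cder + cizq == st.2 then (st.1 ++ [String.ofList [letraActual]], st.2)
    else st
  else st

def loneliest (strng : String) : List String :=
  let s := (PySem.Str.strip strng).toList
  ((List.range s.length).foldl (pvA_step s) ([], 0)).1

-- ===== PORT B =====
-- the `left.append(run); run = run + 1 if ch == ' ' else 0` pass
def pvRuns : List Char → Nat → List Nat
  | [], _ => []
  | ch :: t, run => run :: pvRuns t (if ch == ' ' then run + 1 else 0)

-- the final selection pass over zip(s, left, right); state = (res, best)
def pvSelect : List (Char × Nat × Nat) → List String → Nat → List String
  | [], res, _ => res
  | (ch, l, r) :: t, res, best =>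
    if PySem.Chars.isalpha ch then
      if l + r > best then pvSelect t [String.ofList [ch]] (l + r)
      else if l + r == best then pvSelect t (res ++ [String.ofList [ch]]) best
      else pvSelect t res best
    else pvSelect t res best

def loneliest_alt (strng : String) : List String :=
  let s := (PySem.Str.strip strng).toList
  let left := pvRuns s 0
  let right := (pvRuns s.reverse 0).reverse
  pvSelect (s.zip (left.zip right)) [] 0

-- ===== PRECONDITION & SPEC =====
def Spec_loneliest (strng : String) (out : List String) : Prop := out = loneliest_alt strng
instance (strng : String) (out : List String) : Decidable (Spec_loneliest strng out) := by unfold Spec_loneliest; infer_instance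

-- ===== CLAIM (what is proved, stated in full; the proofs are below) =====
def Claim_equal_loneliest : Prop := ∀ (strng : String), Dom_loneliest strng → Spec_loneliest strng (loneliest strng)

-- ===== LEMMAS AND PROOFS =====

-- number of trailing spaces of a list
def pvTrail (xs : List Char) : Nat := (xs.reverse.takeWhile (fun c => c == ' ')).length

-- per-position specs: consecutive spaces immediately left / right of position i in s
def pvL (s : List Char) (i : Nat) : Nat := pvTrail (s.take i)
def pvR (s : List Char) (i : Nat) : Nat := ((s.drop (i + 1)).takeWhile (fun c => c == ' ')).length

def pvTrip (s : List Char) (i : Nat) : Char × Nat × Nat := (s.getD i ' ', pvL s i, pvR s i)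

-- B's selection step as a state-transition function on a triple
def pvStepT (st : List String × Nat) (t : Char × Nat × Nat) : List String × Nat :=
  if PySem.Chars.isalpha t.1 then
    if t.2.1 + t.2.2 > st.2 then ([String.ofList [t.1]], t.2.1 + t.2.2)
    else if t.2.1 + t.2.2 == st.2 then (st.1 ++ [String.ofList [t.1]], st.2)
    else st
  else st

theorem pvSelect_eq_foldl (l : List (Char × Nat × Nat)) (res : List String) (best : Nat) :
    pvSelect l res best = (l.foldl pvStepT (res, best)).1 := by
  induction l generalizing res best with
  | nil => rfl
  | cons t l ih =>
    obtain ⟨ch, lv, rv⟩ := t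
    simp only [pvSelect, pvStepT, List.foldl_cons]
    split_ifs <;> simp_all

theorem pvTrail_append_single (xs : List Char) (c : Char) :
    pvTrail (xs ++ [c]) = if c == ' ' then pvTrail xs + 1 else 0 := by
  simp only [pvTrail, List.reverse_append, List.reverse_singleton, List.singleton_append,
    List.takeWhile_cons]
  split_ifs <;> simp

theorem pvTrail_all_spaces (xs : List Char) (h : xs.all (fun c => c == ' ')) :
    pvTrail xs = xs.length := by
  have : (List.takeWhile (fun c => c == ' ') xs.reverse) = xs.reverse := by
    rw [List.takeWhile_eq_self_iff]; simpa [List.all_eq_true] using h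
  simp [pvTrail, this]

theorem pvTrail_cons (c : Char) (xs : List Char) :
    pvTrail (c :: xs) =
      if xs.all (fun c => c == ' ') then (if c == ' ' then xs.length + 1 else xs.length)
      else pvTrail xs := by
  induction xs using List.reverseRecOn with
  | nil => by_cases hc : c == ' ' <;> simp [pvTrail, hc]
  | append_singleton ys y ih =>
    rw [show c :: (ys ++ [y]) = (c :: ys) ++ [y] by rfl, pvTrail_append_single,
      pvTrail_append_single, ih]
    by_cases hy : y == ' ' <;> by_cases hall : ys.all (fun c => c == ' ') <;>
      by_cases hc : c == ' ' <;> simp [hy, hall, hc, List.all_append]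

theorem pvA_left_acc (s : List Char) (fuel : Nat) (aux : Int) (c : Nat) :
    pvA_left s fuel aux c = c + pvA_left s fuel aux 0 := by
  induction fuel generalizing aux c with
  | zero => simp [pvA_left]
  | succ fuel ih =>
    simp only [pvA_left]
    split_ifs with h1 h2
    · rw [ih _ (c + 1), ih _ 1]; omega
    · rfl
    · rfl

-- A's backward while-loop computes pvL
theorem pvA_left_eq (s : List Char) :
    ∀ (i fuel : Nat), i ≤ s.length → i ≤ fuel → pvA_left s fuel ((i : Int) - 1) 0 = pvL s i := by
  intro i
  induction i with
  | zero => intro fuel _ _; cases fuel <;> simp [pvA_left, pvL, pvTrail]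
  | succ i ih =>
    intro fuel hlen hfuel
    obtain ⟨fuel, rfl⟩ : ∃ f, fuel = f + 1 := ⟨fuel - 1, by omega⟩
    have haux : ((i : Int) + 1 - 1) = (i : Int) := by ring
    have hlt : i < s.length := by omega
    simp only [pvA_left, Nat.cast_add, Nat.cast_one, haux]
    rw [if_pos (by omega : (i : Int) > -1)]
    have hget : s.getD (i : Int).toNat ' ' = s[i] := by
      rw [Int.toNat_natCast i]; exact List.getD_eq_getElem s ' ' hlt
    have htake : s.take (i + 1) = s.take i ++ [s[i]] := by
      rw [List.take_add_one]; simp [List.getElem?_eq_getElem hlt]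
    rw [show pvL s (i + 1) = if s[i] == ' ' then pvL s i + 1 else 0 by
      rw [pvL, htake, pvTrail_append_single]; rfl]
    by_cases hsp : s[i] == ' '
    · rw [hget, if_pos hsp, if_pos hsp, pvA_left_acc, ih fuel (by omega) (by omega)]
      omega
    · rw [hget, if_neg hsp, if_neg hsp]

theorem pvA_right_acc (s : List Char) (fuel : Nat) (i : Nat) (c : Nat) :
    pvA_right s fuel i c = c + pvA_right s fuel i 0 := by
  induction fuel generalizing i c with
  | zero => simp [pvA_right]
  | succ fuel ih =>
    simp only [pvA_right]
    split_ifs with h1 h2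
    · rw [ih _ (c + 1), ih _ 1]; omega
    · rfl
    · rfl

-- A's forward while-loop computes the leading-space count of s.drop i
theorem pvA_right_eq (s : List Char) :
    ∀ (fuel i : Nat), s.length ≤ i + fuel →
      pvA_right s fuel i 0 = ((s.drop i).takeWhile (fun c => c == ' ')).length := by
  intro fuel
  induction fuel with
  | zero =>
    intro i h
    have hnil : s.drop i = [] := List.drop_eq_nil_of_le (by omega)
    simp [pvA_right, hnil]
  | succ fuel ih =>
    intro i h
    simp only [pvA_right]
    by_cases hlt : i < s.length
    · rw [if_pos hlt]
      have hget : s.getD i ' ' = s[i] := List.getD_eq_getElem s ' ' hlt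
      have hdrop : s.drop i = s[i] :: s.drop (i + 1) := List.drop_eq_getElem_cons hlt
      by_cases hsp : s[i] == ' '
      · rw [hget, if_pos hsp, pvA_right_acc, ih (i + 1) (by omega), hdrop,
          List.takeWhile_cons, if_pos hsp]
        simp [Nat.add_comm]
      · rw [hget, if_neg hsp, hdrop, List.takeWhile_cons, if_neg hsp]
        rfl
    · rw [if_neg hlt]
      have hnil : s.drop i = [] := List.drop_eq_nil_of_le (by omega)
      simp [hnil]

theorem pvRuns_length (s : List Char) (run : Nat) : (pvRuns s run).length = s.length := by
  induction s generalizing run with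
  | nil => rfl
  | cons c t ih => simp [pvRuns, ih]

-- closed form of the run-list element: the run carried in is only visible while the whole
-- prefix before position i is spaces
theorem pvRuns_getElem (s : List Char) :
    ∀ (run i : Nat) (h : i < s.length),
      (pvRuns s run)[i]'(by rw [pvRuns_length]; exact h) =
        if (s.take i).all (fun c => c == ' ') then run + i else pvL s i := by
  induction s with
  | nil => intro _ i h; simp at h
  | cons c t ih =>
    intro run i h
    cases i with
    | zero => simp [pvRuns, pvL]
    | succ i =>
      have hlt : i < t.length := by simpa using h
      have hi : i ≤ t.length := by omega
      simp only [pvRuns, List.getElem_cons_succ]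
      rw [ih _ i hlt]
      have htake : (c :: t).take (i + 1) = c :: t.take i := rfl
      have hLcons : pvL (c :: t) (i + 1) =
          if (t.take i).all (fun c => c == ' ')
          then (if c == ' ' then (t.take i).length + 1 else (t.take i).length)
          else pvL t i := by
        rw [pvL, htake, pvTrail_cons]; rfl
      have hlen : (t.take i).length = i := by simp [List.length_take]; omega
      by_cases hall : (t.take i).all (fun c => c == ' ') <;>
        by_cases hc : c == ' ' <;>
          simp [hc, hall, htake, hLcons, hlen] <;> omega

-- B's left run list has element i = pvL s i
theorem pvLeft_getElem (s : List Char) (i : Nat) (h : i < s.length) :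
    (pvRuns s 0)[i]'(by rw [pvRuns_length]; exact h) = pvL s i := by
  rw [pvRuns_getElem s 0 i h]
  by_cases hall : (s.take i).all (fun c => c == ' ')
  · rw [if_pos hall, pvL, pvTrail_all_spaces _ hall]
    simp [List.length_take]; omega
  · rw [if_neg hall]

-- the trailing-space count of a reversed list is the leading-space count
theorem pvTrail_reverse (xs : List Char) :
    pvTrail xs.reverse = (xs.takeWhile (fun c => c == ' ')).length := by
  simp [pvTrail]

-- B's right run list has element i = pvR s i
theorem pvRight_getElem (s : List Char) (i : Nat) (h : i < s.length)
    (h' : i < (pvRuns s.reverse 0).reverse.length) :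
    ((pvRuns s.reverse 0).reverse)[i] = pvR s i := by
  have hlen : (pvRuns s.reverse 0).length = s.length := by
    rw [pvRuns_length]; simp
  rw [List.getElem_reverse]
  have hj : (pvRuns s.reverse 0).length - 1 - i < s.reverse.length := by
    simp [hlen]; omega
  rw [pvLeft_getElem s.reverse _ hj]
  have hidx : (pvRuns s.reverse 0).length - 1 - i = s.length - 1 - i := by rw [hlen]
  rw [hidx, pvL, List.take_reverse, pvTrail_reverse,
    show s.length - (s.length - 1 - i) = i + 1 by omega, pvR]

-- the zipped list B folds over is exactly the triple table
theorem pvZip_eq_map_trip (s : List Char) :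
    s.zip ((pvRuns s 0).zip ((pvRuns s.reverse 0).reverse)) =
      (List.range s.length).map (pvTrip s) := by
  have hl : (pvRuns s 0).length = s.length := pvRuns_length s 0
  have hr : ((pvRuns s.reverse 0).reverse).length = s.length := by
    rw [List.length_reverse, pvRuns_length, List.length_reverse]
  apply List.ext_getElem
  · simp [List.length_zip, hl, hr]
  · intro i h1 h2
    have hi : i < s.length := by simpa [List.length_zip, hl, hr] using h1
    rw [List.getElem_zip, List.getElem_zip, List.getElem_map, List.getElem_range]
    rw [pvLeft_getElem s i hi, pvRight_getElem s i hi]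
    simp [pvTrip, List.getD_eq_getElem?_getD, List.getElem?_eq_getElem hi]

-- A's per-index step is B's selection step applied to the triple at that index
theorem pvA_step_eq (s : List Char) (st : List String × Nat) (i : Nat) (h : i < s.length) :
    pvA_step s st i = pvStepT st (pvTrip s i) := by
  have hl : pvA_left s s.length ((i : Int) - 1) 0 = pvL s i :=
    pvA_left_eq s i s.length (by omega) (by omega)
  have hr : pvA_right s (s.length + 1) (i + 1) 0 = pvR s i :=
    pvA_right_eq s (s.length + 1) (i + 1) (by omega)
  simp only [pvA_step, pvStepT, pvTrip, hl, hr, Nat.add_comm (pvR s i) (pvL s i)]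

-- ===== VERDICT (by name: the statement is the Claim_ definition above) =====
theorem loneliest_spec : Claim_equal_loneliest := by
  intro strng _
  show loneliest strng = loneliest_alt strng
  simp only [loneliest, loneliest_alt]
  rw [pvZip_eq_map_trip, pvSelect_eq_foldl, List.foldl_map]
  exact congrArg Prod.fst (PySem.List.foldl_congr_mem _ _ _ _
    (fun st i hi => pvA_step_eq _ st i (List.mem_range.mp hi)))
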